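-- pv_equiv track=rewrite | github.com/Anon214/2040AI | game_functions.py | right_stack
-- ===== SOURCE A (Python) =====
-- def right_stack(my_list):
--     for elem in my_list:
--         j = 3
--         k = 2
--         for i in range(3):
--             if elem[k] != 0:
--                 while elem[j] != 0 and k < j:
--                     j -= 1
--
--                 if k != j:
--                     elem[j] = elem[k]
--                     elem[k] = 0
--             k -= 1
--
--     return my_list
-- ===== SOURCE B (Python) =====
-- def right_stack(my_list):
--     # Filter-then-rebuild on the fixed 4-wide board: collect the nonzero values
--     # of the four slots, then overwrite them with left-padding zeros followed by
--     # those values. Mutates rows in place and returns the same list object, like A.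
--     for elem in my_list:
--         vals = [elem[i] for i in range(4) if elem[i] != 0]
--         elem[:4] = [0] * (4 - len(vals)) + vals
--     return my_list
-- ===== Notes on version B (the rewrite author's own statement) =====
-- stated objective: simpler
-- what changed: Replaces the in-place two-pointer (j/k) compaction scan over each row with a filter-then-rebuild pass: collect the nonzero values of the first four slots and overwrite them with left-padding zeros followed by those values.
-- outside the precondition, e.g. on right_stack([[0, 0, 0]]): A returns [[0, 0, 0]], B raises IndexError; on right_stack([[1]]): A raises IndexError, B raises IndexError
import Mathlib
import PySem

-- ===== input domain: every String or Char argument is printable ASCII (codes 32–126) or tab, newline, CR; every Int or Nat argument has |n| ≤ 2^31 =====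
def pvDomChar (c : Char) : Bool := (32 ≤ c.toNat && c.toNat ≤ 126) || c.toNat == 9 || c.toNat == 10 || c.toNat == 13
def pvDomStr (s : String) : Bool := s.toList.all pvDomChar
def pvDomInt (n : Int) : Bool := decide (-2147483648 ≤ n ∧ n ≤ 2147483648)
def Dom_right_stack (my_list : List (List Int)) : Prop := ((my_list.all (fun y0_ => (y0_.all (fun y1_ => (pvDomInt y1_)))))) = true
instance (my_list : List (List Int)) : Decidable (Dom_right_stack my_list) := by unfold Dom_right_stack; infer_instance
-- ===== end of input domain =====

-- B mutates rows in place just like A; the theorems are about the returned value.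
-- B changes the control flow: filter-then-rebuild instead of a two-pointer compaction scan (objective: simpler).

-- ===== PORT A =====
-- the inner `while elem[j] != 0 and k < j: j -= 1` loop
def pvFindJ (e : List Int) (k : Nat) : Nat → Nat
  | 0 => 0
  | j + 1 => if e.getD (j + 1) 0 ≠ 0 ∧ k < j + 1 then pvFindJ e k j else j + 1

-- one row of A's outer loop: the `for i in range(3)` body over state (elem, j, k)
def pvRowA (elem : List Int) : List Int :=
  ((List.range 3).foldl (fun (s : List Int × Nat × Nat) _ =>
      let e := s.1; let j := s.2.1; let k := s.2.2
      if e.getD k 0 ≠ 0 then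
        let j' := pvFindJ e k j
        if k ≠ j' then (((e.set j' (e.getD k 0)).set k 0), j', k - 1)
        else (e, j', k - 1)
      else (e, j, k - 1)) (elem, 3, 2)).1

def right_stack (my_list : List (List Int)) : List (List Int) :=
  my_list.map pvRowA

-- ===== PORT B =====
-- `vals = [elem[i] for i in range(4) if elem[i] != 0]; elem[:4] = [0]*(4-len(vals)) + vals`
def pvRowB (elem : List Int) : List Int :=
  let vals := (List.range 4).filterMap
    (fun i => if elem.getD i 0 ≠ 0 then some (elem.getD i 0) else none)
  List.replicate (4 - vals.length) 0 ++ vals ++ elem.drop 4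

def right_stack_alt (my_list : List (List Int)) : List (List Int) :=
  my_list.map pvRowB

-- ===== PRECONDITION & SPEC =====
-- Pre_ excludes inputs containing a row shorter than 4: on those A raises IndexError,
-- except an all-zero length-3 row, which A returns unchanged by accident of its scan
-- order while B raises IndexError there — a degenerate board nobody would specify.
def Pre_right_stack (my_list : List (List Int)) : Prop :=
  ∀ e ∈ my_list, 4 ≤ e.length
instance (my_list : List (List Int)) : Decidable (Pre_right_stack my_list) := by
  unfold Pre_right_stack; infer_instance

def pvWitness_right_stack : List (List Int) := [[2, 0, 2, 4], [0, 0, 0, 0, 5]]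

def Spec_right_stack (my_list : List (List Int)) (out : List (List Int)) : Prop :=
  out = right_stack_alt my_list
instance (my_list : List (List Int)) (out : List (List Int)) : Decidable (Spec_right_stack my_list out) := by
  unfold Spec_right_stack; infer_instance

-- ===== CLAIM =====
def Claim_equal_right_stack : Prop := ∀ (my_list : List (List Int)),
  Dom_right_stack my_list → Pre_right_stack my_list →
  Spec_right_stack my_list (right_stack my_list)

-- ===== LEMMAS AND PROOFS =====
set_option maxHeartbeats 2000000 in
theorem pvRow_eq (a b c d : Int) (t : List Int) :
    pvRowA (a :: b :: c :: d :: t) = pvRowB (a :: b :: c :: d :: t) := by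
  by_cases ha : a = 0 <;> by_cases hb : b = 0 <;> by_cases hc : c = 0 <;> by_cases hd : d = 0 <;>
    simp [pvRowA, pvRowB, pvFindJ, List.range_succ, ha, hb, hc, hd, List.filter]

theorem pvMap_eq (l : List (List Int)) (hpre : ∀ e ∈ l, 4 ≤ e.length) :
    l.map pvRowA = l.map pvRowB := by
  induction l with
  | nil => rfl
  | cons e l ih =>
    have he : 4 ≤ e.length := hpre e (by simp)
    match e, he with
    | a :: b :: c :: d :: t, _ =>
      simp only [List.map]
      rw [pvRow_eq, ih (fun x hx => hpre x (List.mem_cons_of_mem _ hx))]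

-- ===== VERDICT =====
theorem right_stack_spec : Claim_equal_right_stack := by
  intro l _ hpre
  unfold Spec_right_stack right_stack right_stack_alt
  exact pvMap_eq l hpre
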